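-- pv_equiv track=rewrite | github.com/mahakbansal20/Presidio | processor.py | get_row_risk
-- ===== SOURCE A (Python) =====
-- def get_row_risk(entities):
--     risks = [e["risk"] for e in entities]
--
--     if "RED" in risks:
--         return "HIGH"
--     elif "YELLOW" in risks:
--         return "MEDIUM"
--     elif "GREEN" in risks:
--         return "LOW"
--     return "NONE"
-- ===== SOURCE B (Python) =====
-- def get_row_risk(entities):
--     rank = {"RED": 3, "YELLOW": 2, "GREEN": 1}
--     best = 0
--     for e in entities:
--         best = max(best, rank.get(e["risk"], 0))
--     return {3: "HIGH", 2: "MEDIUM", 1: "LOW"}.get(best, "NONE")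
-- ===== Notes on version B (the rewrite author's own statement) =====
-- stated objective: idiomatic
-- what changed: Replaces building a risks list plus three membership scans with a single max-of-priority pass over the entities and a final rank-to-label translation.
import Mathlib
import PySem

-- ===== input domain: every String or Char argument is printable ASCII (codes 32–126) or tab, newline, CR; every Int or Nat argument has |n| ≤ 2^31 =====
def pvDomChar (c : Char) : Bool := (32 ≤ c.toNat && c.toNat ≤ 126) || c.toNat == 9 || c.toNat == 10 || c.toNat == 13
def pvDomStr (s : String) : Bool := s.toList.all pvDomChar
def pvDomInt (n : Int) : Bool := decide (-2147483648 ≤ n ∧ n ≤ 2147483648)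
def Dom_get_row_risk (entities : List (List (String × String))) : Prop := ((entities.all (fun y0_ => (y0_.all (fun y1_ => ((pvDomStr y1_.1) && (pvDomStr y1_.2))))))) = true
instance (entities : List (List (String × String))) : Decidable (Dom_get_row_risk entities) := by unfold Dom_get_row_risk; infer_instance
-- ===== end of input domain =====

-- B replaces the risks-list plus three membership scans with one max-of-priority pass (idiomatic, same cost).
-- ===== PORT A =====
-- e["risk"] on an association-list dict: first match; Pre_ guarantees the key exists, so getD "" is exact there.
def get_row_risk (entities : List (List (String × String))) : String :=
  let risks := entities.map (fun e => (e.lookup "risk").getD "")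
  if risks.contains "RED" then "HIGH"
  else if risks.contains "YELLOW" then "MEDIUM"
  else if risks.contains "GREEN" then "LOW"
  else "NONE"

-- ===== PORT B =====
-- rank.get(r, 0)
def pvRank (r : String) : Nat :=
  if r = "RED" then 3 else if r = "YELLOW" then 2 else if r = "GREEN" then 1 else 0

def get_row_risk_alt (entities : List (List (String × String))) : String :=
  let best := entities.foldl (fun b e => max b (pvRank ((e.lookup "risk").getD ""))) 0
  if best = 3 then "HIGH" else if best = 2 then "MEDIUM" else if best = 1 then "LOW" else "NONE"

-- ===== PRECONDITION & SPEC =====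
-- Pre_ excludes inputs where some entity lacks the "risk" key, on which A raises KeyError.
def Pre_get_row_risk (entities : List (List (String × String))) : Prop :=
  (entities.all (fun e => (e.lookup "risk").isSome)) = true
instance (entities : List (List (String × String))) : Decidable (Pre_get_row_risk entities) := by unfold Pre_get_row_risk; infer_instance
def pvWitness_get_row_risk : (List (List (String × String))) := [[("risk", "GREEN")], [("risk", "RED")]]

def Spec_get_row_risk (entities : List (List (String × String))) (out : String) : Prop := out = get_row_risk_alt entities
instance (entities : List (List (String × String))) (out : String) : Decidable (Spec_get_row_risk entities out) := by unfold Spec_get_row_risk; infer_instance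

-- ===== CLAIM (what is proved, stated in full; the proofs are below) =====
def Claim_equal_get_row_risk : Prop := ∀ (entities : List (List (String × String))), Dom_get_row_risk entities → Pre_get_row_risk entities → Spec_get_row_risk entities (get_row_risk entities)

-- ===== LEMMAS AND PROOFS =====

-- the nested-if membership form computes the max of pvRank over the list
def pvBest (risks : List String) : Nat :=
  if risks.contains "RED" then 3
  else if risks.contains "YELLOW" then 2
  else if risks.contains "GREEN" then 1 else 0

lemma pvBest_cons (r : String) (rs : List String) :
    pvBest (r :: rs) = max (pvRank r) (pvBest rs) := by
  simp only [pvBest, pvRank, List.contains_cons]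
  by_cases h1 : r = "RED" <;> by_cases h2 : r = "YELLOW" <;> by_cases h3 : r = "GREEN" <;>
    simp_all <;> split_ifs <;> simp_all

lemma foldl_rank_eq (l : List (List (String × String))) (acc : Nat) :
    l.foldl (fun b e => max b (pvRank ((e.lookup "risk").getD ""))) acc
      = max acc (pvBest (l.map (fun e => (e.lookup "risk").getD ""))) := by
  induction l generalizing acc with
  | nil => simp [pvBest]
  | cons e rest ih =>
      simp only [List.foldl_cons, ih, List.map_cons, pvBest_cons]
      omega

lemma pvBest_le (risks : List String) : pvBest risks ≤ 3 := by
  unfold pvBest; split_ifs <;> omega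

-- ===== VERDICT (by name: the statement is the Claim_ definition above) =====
theorem get_row_risk_spec : Claim_equal_get_row_risk := by
  intro entities _ _
  unfold Spec_get_row_risk get_row_risk get_row_risk_alt
  have hf : entities.foldl (fun b e => max b (pvRank ((e.lookup "risk").getD ""))) 0
      = pvBest (entities.map (fun e => (e.lookup "risk").getD "")) := by
    rw [foldl_rank_eq]
    omega
  simp only [hf]
  have := pvBest_le (entities.map (fun e => (e.lookup "risk").getD ""))
  unfold pvBest at *
  split_ifs <;> simp_all
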